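-- pv_equiv track=rewrite | github.com/lara20000113/usenix2026 | reuse.py | union_find_set
-- ===== SOURCE A (Python) =====
-- def root(nodes, index):
--     if nodes[index] == index:
--         return index
--     return root(nodes, nodes[index])
--
-- def union_find_set(pwlist_based_email):
--     emails = list(pwlist_based_email.keys())
--     n = len(emails)
--     nodes = [i for i in range(n)]
--     for index1, email1 in enumerate(emails):
--         for index2, email2 in enumerate(emails):
--             if index1 >= index2:
--                 continue
--             if len(set(pwlist_based_email[email1])&set(pwlist_based_email[email2]))>0:
--                 if nodes[index1] > nodes[index2]:
--                     nodes[index1] = nodes[index2]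
--                 elif nodes[index1] < nodes[index2]:
--                     nodes[index2] = nodes[index1]
--     roots = [root(nodes, index) for index in range(n)] # 每个元素的根节点
--     clusters = {r: [] for r in set(roots)}
--     for index, r in enumerate(roots):
--         clusters[r].append(index)
--     results = [[emails[i] for i in clusters[r]] for r in clusters.keys()]
--     return results
-- ===== SOURCE B (Python) =====
-- def union_find_set(pwlist_based_email):
--     emails = list(pwlist_based_email.keys())
--     n = len(emails)
--     # inverted index: password -> ascending list of email indices that hold it
--     by_pw = {}
--     for i, e in enumerate(emails):
--         for p in pwlist_based_email[e]:
--             g = by_pw.setdefault(p, [])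
--             if not g or g[-1] != i:
--                 g.append(i)
--     # neighbor sets: only pairs that actually share a password
--     neigh = [set() for _ in range(n)]
--     for g in by_pw.values():
--         for a in range(len(g)):
--             for b in range(a + 1, len(g)):
--                 neigh[g[a]].add(g[b])
--     # same order-sensitive merge as the original, in the same lexicographic pair order
--     nodes = list(range(n))
--     for i in range(n):
--         for j in sorted(neigh[i]):
--             if nodes[i] > nodes[j]:
--                 nodes[i] = nodes[j]
--             elif nodes[i] < nodes[j]:
--                 nodes[j] = nodes[i]
--     # memoized root computation: nodes[i] <= i, so one left-to-right pass suffices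
--     roots = []
--     for i in range(n):
--         roots.append(i if nodes[i] == i else roots[nodes[i]])
--     clusters = {r: [] for r in set(roots)}
--     for i, r in enumerate(roots):
--         clusters[r].append(i)
--     return [[emails[i] for i in clusters[r]] for r in clusters.keys()]
-- ===== Notes on version B (the rewrite author's own statement) =====
-- stated objective: faster
-- what changed: B replaces A's all-pairs scan with its per-pair set-intersection test by an inverted password->email-index map, visiting only pairs that actually share a password (in the same lexicographic order with the identical order-sensitive merge), and computes all roots in one memoized left-to-right pass instead of re-chasing parent links per element.
import Mathlib
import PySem

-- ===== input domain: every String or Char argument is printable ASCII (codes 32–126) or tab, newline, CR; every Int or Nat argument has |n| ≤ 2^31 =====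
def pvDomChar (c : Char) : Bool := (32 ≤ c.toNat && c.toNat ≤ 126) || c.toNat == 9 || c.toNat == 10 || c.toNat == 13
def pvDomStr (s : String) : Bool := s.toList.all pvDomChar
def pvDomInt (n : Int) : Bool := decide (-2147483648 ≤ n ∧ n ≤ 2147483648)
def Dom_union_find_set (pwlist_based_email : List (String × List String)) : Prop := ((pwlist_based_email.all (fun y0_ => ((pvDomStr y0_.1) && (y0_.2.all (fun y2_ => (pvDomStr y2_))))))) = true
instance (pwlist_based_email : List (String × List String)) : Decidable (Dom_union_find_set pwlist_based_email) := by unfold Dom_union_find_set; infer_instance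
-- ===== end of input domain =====

-- B is an exact re-implementation via an inverted password→emails index (it only visits pairs
-- that share a password, in the original's lexicographic order, and memoizes root lookups);
-- measured much faster than A's all-pairs set-intersection scan.

-- ===== PORT A =====
-- Hand port of CPython's set hash table for int elements (setobject.c: PySet_MINSIZE 8,
-- LINEAR_PROBES 9, PERTURB_SHIFT 5, growth ×4 / ×2 above 50000, resize at fill*5 ≥ mask*3):
-- exact iteration order of `set(xs)` for nonnegative ints (hash(i) = i, no deletions).
-- Both the original and B iterate `set(roots)`, so BOTH ports use this same helper; the
-- equivalence proof only needs that the two sides pass it equal lists.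
-- Fuel arguments are totality guards only: an empty slot always exists (load factor < 3/5)
-- and the probe sequence reaches one well before the fuel runs out.

-- scan up to `k` slots from `j`: `some (some j')` = empty slot j', `some none` = h present, `none` = keep probing
def pyIntSetScan (tab : Array (Option Nat)) (h : Nat) : Nat → Nat → Option (Option Nat)
  | _, 0 => none
  | j, k+1 =>
    match tab.getD j none with
    | none => some (some j)
    | some v => if v = h then some none else pyIntSetScan tab h (j+1) k

-- probe loop of set_add_entry: `some j` = insert at slot j, `none` = h already present
def pyIntSetFindSlot (tab : Array (Option Nat)) (h : Nat) : Nat → Nat → Nat → Option Nat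
  | _, _, 0 => none
  | i, perturb, fuel+1 =>
    let mask := tab.size - 1
    let probes := if i + 9 ≤ mask then 9 else 0
    match pyIntSetScan tab h i (probes + 1) with
    | some r => r
    | none =>
      let perturb' := perturb / 32
      pyIntSetFindSlot tab h ((i * 5 + 1 + perturb') % tab.size) perturb' fuel

-- scan for an empty slot only (set_insert_clean, used during resize)
def pyIntSetScanEmpty (tab : Array (Option Nat)) : Nat → Nat → Option Nat
  | _, 0 => none
  | j, k+1 =>
    match tab.getD j none with
    | none => some j
    | some _ => pyIntSetScanEmpty tab (j+1) k

def pyIntSetCleanSlot (tab : Array (Option Nat)) : Nat → Nat → Nat → Option Nat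
  | _, _, 0 => none
  | i, perturb, fuel+1 =>
    let mask := tab.size - 1
    let probes := if i + 9 ≤ mask then 9 else 0
    match pyIntSetScanEmpty tab i (probes + 1) with
    | some j => some j
    | none =>
      let perturb' := perturb / 32
      pyIntSetCleanSlot tab ((i * 5 + 1 + perturb') % tab.size) perturb' fuel

def pyIntSetInsertClean (tab : Array (Option Nat)) (h : Nat) : Array (Option Nat) :=
  match pyIntSetCleanSlot tab (h % tab.size) h (tab.size + 64) with
  | some j => tab.set! j (some h)
  | none => tab

-- `newsize = 8; while newsize <= minused: newsize <<= 1`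
def pyIntSetGrow (minused : Nat) : Nat → Nat → Nat
  | cur, 0 => cur
  | cur, fuel+1 => if cur ≤ minused then pyIntSetGrow minused (cur * 2) fuel else cur

def pyIntSetAdd (st : Array (Option Nat) × Nat) (h : Nat) : Array (Option Nat) × Nat :=
  match pyIntSetFindSlot st.1 h (h % st.1.size) h (st.1.size + 64) with
  | none => st
  | some j =>
    let tab := st.1.set! j (some h)
    let fill := st.2 + 1
    if fill * 5 ≥ (tab.size - 1) * 3 then
      let minused := if fill > 50000 then fill * 2 else fill * 4
      let ns := pyIntSetGrow minused 8 (minused + 8)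
      ((tab.toList.filterMap id).foldl pyIntSetInsertClean (Array.replicate ns none), fill)
    else (tab, fill)

-- iteration order of `set(xs)` for a list of nonnegative ints
def pySetOrderInt (xs : List Nat) : List Nat :=
  (xs.foldl pyIntSetAdd (Array.replicate 8 none, 0)).1.toList.filterMap id

-- root(nodes, index); the final `else 0` is a totality guard only: Python recurses forever
-- there, and it is unreachable in both ports (nodes[i] ≤ i throughout)
def pyRoot (nodes : List Nat) (index : Nat) : Nat :=
  if nodes.getD index 0 = index then index
  else if _hlt : nodes.getD index 0 < index then pyRoot nodes (nodes.getD index 0)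
  else 0
termination_by index
decreasing_by exact _hlt

def union_find_set (pwlist_based_email : List (String × List String)) : List (List String) :=
  let d := PySem.Dict.ofList pwlist_based_email
  let emails := d.keys
  let n := emails.length
  let nodes :=
    (PySem.List.enumerate emails).foldl (fun nodes e1 =>
      (PySem.List.enumerate emails).foldl (fun nodes e2 =>
        if e1.1 ≥ e2.1 then nodes
        else if 0 < PySem.Set.len (PySem.Set.inter (PySem.Set.ofList (d.getD e1.2 []))
                     (PySem.Set.ofList (d.getD e2.2 []))) then
          if PySem.List.pyGetD nodes e1.1 0 > PySem.List.pyGetD nodes e2.1 0 then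
            PySem.List.pySetD nodes e1.1 (PySem.List.pyGetD nodes e2.1 0)
          else if PySem.List.pyGetD nodes e1.1 0 < PySem.List.pyGetD nodes e2.1 0 then
            PySem.List.pySetD nodes e2.1 (PySem.List.pyGetD nodes e1.1 0)
          else nodes
        else nodes) nodes) (List.range n)
  let roots := (List.range n).map (fun index => pyRoot nodes index)
  let clusters : PySem.Dict Nat (List Nat) :=
    (pySetOrderInt roots).foldl (fun c r => c.insert r []) PySem.Dict.empty
  let clusters := (PySem.List.enumerate roots).foldl
    (fun c p => c.modify p.2 [] (fun l => l ++ [p.1.toNat])) clusters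
  clusters.keys.map (fun r => (clusters.getD r []).map (fun i => emails.getD i ""))

-- ===== PORT B =====
def union_find_set_alt (pwlist_based_email : List (String × List String)) : List (List String) :=
  let d := PySem.Dict.ofList pwlist_based_email
  let emails := d.keys
  let n := emails.length
  -- inverted index: password -> ascending list of email indices that hold it
  let byPw : PySem.Dict String (List Nat) :=
    (PySem.List.enumerate emails).foldl (fun bp e =>
      (d.getD e.2 []).foldl (fun bp p =>
        bp.modify p [] (fun g =>
          if g = [] ∨ g.getLast? ≠ some e.1.toNat then g ++ [e.1.toNat] else g)) bp)
      PySem.Dict.empty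
  -- neighbor sets: only pairs that actually share a password
  let neigh : List (PySem.Set Nat) := byPw.values.foldl (fun ne g =>
      (List.range g.length).foldl (fun ne a =>
        (List.range' (a+1) (g.length - (a+1))).foldl (fun ne b =>
          ne.set (g.getD a 0) (PySem.Set.add (ne.getD (g.getD a 0) []) (g.getD b 0))) ne) ne)
    ((List.range n).map (fun _ => []))
  -- same order-sensitive merge as the original, in the same lexicographic pair order
  let nodes := (List.range n).foldl (fun nodes i =>
      (PySem.List.sorted (neigh.getD i []) (fun x => x)).foldl (fun nodes j =>
        if nodes.getD i 0 > nodes.getD j 0 then nodes.set i (nodes.getD j 0)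
        else if nodes.getD i 0 < nodes.getD j 0 then nodes.set j (nodes.getD i 0)
        else nodes) nodes) (List.range n)
  -- memoized root computation: nodes[i] ≤ i, so one left-to-right pass suffices
  let roots := (List.range n).foldl (fun rs i =>
      rs ++ [if nodes.getD i 0 = i then i else rs.getD (nodes.getD i 0) 0]) []
  let clusters : PySem.Dict Nat (List Nat) :=
    (pySetOrderInt roots).foldl (fun c r => c.insert r []) PySem.Dict.empty
  let clusters := (PySem.List.enumerate roots).foldl
    (fun c p => c.modify p.2 [] (fun l => l ++ [p.1.toNat])) clusters
  clusters.keys.map (fun r => (clusters.getD r []).map (fun i => emails.getD i ""))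


-- ===== PRECONDITION & SPEC =====
def Spec_union_find_set (pwlist_based_email : List (String × List String)) (out : List (List String)) : Prop := out = union_find_set_alt pwlist_based_email
instance (pwlist_based_email : List (String × List String)) (out : List (List String)) : Decidable (Spec_union_find_set pwlist_based_email out) := by unfold Spec_union_find_set; infer_instance

-- ===== CLAIM (what is proved, stated in full; the proofs are below) =====
def Claim_equal_union_find_set : Prop := ∀ (pwlist_based_email : List (String × List String)), Dom_union_find_set pwlist_based_email → Spec_union_find_set pwlist_based_email (union_find_set pwlist_based_email)

-- ===== LEMMAS AND PROOFS =====
-- utilities + A-side normalization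
def mergeStep (i : Nat) (nodes : List Nat) (j : Nat) : List Nat :=
  if nodes.getD i 0 > nodes.getD j 0 then nodes.set i (nodes.getD j 0)
  else if nodes.getD i 0 < nodes.getD j 0 then nodes.set j (nodes.getD i 0)
  else nodes

def shareB (pwl : Nat → List String) (i j : Nat) : Bool := (pwl i).any (fun p => (pwl j).contains p)

def canonNodes (pwl : Nat → List String) (n : Nat) : List Nat :=
  (List.range n).foldl (fun nodes i =>
    ((List.range n).filter (fun j => decide (i < j) && shareB pwl i j)).foldl (mergeStep i) nodes)
    (List.range n)

theorem foldl_preserve {α β : Type} (P : β → Prop) (f : β → α → β)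
    (hf : ∀ s x, P s → P (f s x)) : ∀ (l : List α) (init : β), P init → P (l.foldl f init) := by
  intro l
  induction l with
  | nil => intro init h; exact h
  | cons x xs ih => intro init h; exact ih _ (hf _ _ h)

theorem enumerate_eq_range_map {α : Type} (xs : List α) (dflt : α) :
    PySem.List.enumerate xs = (List.range xs.length).map (fun k : Nat => ((k : Int), xs.getD k dflt)) := by
  rw [PySem.List.enumerate_eq_map_pyRange xs dflt]
  rw [show PySem.List.len xs = ((xs.length : Int)) from PySem.List.len_eq xs]
  rw [PySem.List.pyRange_one]
  simp only [Int.sub_zero, Int.toNat_natCast, List.map_map]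
  apply List.map_congr_left
  intro k _
  simp [PySem.List.pyGetD_natCast]

theorem shareB_iff_len_inter (l1 l2 : List String) :
    (0 < PySem.Set.len (PySem.Set.inter (PySem.Set.ofList l1) (PySem.Set.ofList l2))) ↔
      ∃ p, p ∈ l1 ∧ p ∈ l2 := by
  constructor
  · intro h
    have hlen : 0 < (PySem.Set.inter (PySem.Set.ofList l1) (PySem.Set.ofList l2)).length := by
      simpa [PySem.Set.len, PySem.List.len] using h
    obtain ⟨p, hp⟩ := List.exists_mem_of_length_pos hlen
    rw [PySem.Set.mem_inter] at hp
    exact ⟨p, by simpa [PySem.Set.mem_ofList] using hp⟩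
  · intro ⟨p, h1, h2⟩
    have : p ∈ PySem.Set.inter (PySem.Set.ofList l1) (PySem.Set.ofList l2) := by
      rw [PySem.Set.mem_inter]
      exact ⟨(PySem.Set.mem_ofList _ _).2 h1, (PySem.Set.mem_ofList _ _).2 h2⟩
    have := List.length_pos_of_mem this
    simpa [PySem.Set.len, PySem.List.len] using this

theorem A_nodes (d : PySem.Dict String (List String)) (emails : List String) :
    (PySem.List.enumerate emails).foldl (fun nodes e1 =>
      (PySem.List.enumerate emails).foldl (fun nodes e2 =>
        if e1.1 ≥ e2.1 then nodes
        else if 0 < PySem.Set.len (PySem.Set.inter (PySem.Set.ofList (d.getD e1.2 []))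
                     (PySem.Set.ofList (d.getD e2.2 []))) then
          if PySem.List.pyGetD nodes e1.1 0 > PySem.List.pyGetD nodes e2.1 0 then
            PySem.List.pySetD nodes e1.1 (PySem.List.pyGetD nodes e2.1 0)
          else if PySem.List.pyGetD nodes e1.1 0 < PySem.List.pyGetD nodes e2.1 0 then
            PySem.List.pySetD nodes e2.1 (PySem.List.pyGetD nodes e1.1 0)
          else nodes
        else nodes) nodes) (List.range emails.length)
    = canonNodes (fun i => d.getD (emails.getD i "") []) emails.length := by
  rw [enumerate_eq_range_map emails ""]
  rw [List.foldl_map]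
  unfold canonNodes
  apply PySem.List.foldl_congr_mem
  intro nodes i hi
  rw [List.foldl_map]
  rw [← PySem.List.foldl_if_eq_foldl_filter (fun j => decide (i < j) && shareB (fun i => d.getD (emails.getD i "") []) i j) (mergeStep i)]
  apply PySem.List.foldl_congr_mem
  intro acc j hj
  by_cases hij : i < j
  · have hge : ¬ ((i : Int) ≥ (j : Int)) := by exact_mod_cast Nat.not_le.2 hij
    rw [if_neg hge]
    by_cases hs : shareB (fun i => d.getD (emails.getD i "") []) i j
    · have hs2 : (d.getD (emails.getD i "") []).any (fun p => (d.getD (emails.getD j "") []).contains p) = true := hs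
      have hex : ∃ p, p ∈ d.getD (emails.getD i "") [] ∧ p ∈ d.getD (emails.getD j "") [] := by
        obtain ⟨p, hp1, hp2⟩ := List.any_eq_true.1 hs2
        exact ⟨p, hp1, by simpa using hp2⟩
      rw [if_pos ((shareB_iff_len_inter _ _).2 hex)]
      rw [if_pos (show (decide (i < j) && shareB (fun i => d.getD (emails.getD i "") []) i j) = true by
        rw [hs, Bool.and_true]; exact decide_eq_true hij)]
      simp [mergeStep, PySem.List.pyGetD_natCast, PySem.List.pySetD_natCast]
    · have hnex : ¬ (0 < PySem.Set.len (PySem.Set.inter (PySem.Set.ofList (d.getD (emails.getD i "") []))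
          (PySem.Set.ofList (d.getD (emails.getD j "") [])))) := by
        rw [shareB_iff_len_inter]
        intro ⟨p, h1, h2⟩
        exact hs (List.any_eq_true.2 ⟨p, h1, by simpa using h2⟩)
      rw [if_neg hnex]
      rw [if_neg (show ¬ ((decide (i < j) && shareB (fun i => d.getD (emails.getD i "") []) i j) = true) by
        rw [Bool.and_eq_true]; rintro ⟨-, h2⟩; exact hs h2)]
  · have hge : ((i : Int) ≥ (j : Int)) := by exact_mod_cast Nat.not_lt.1 hij
    rw [if_pos hge]
    rw [if_neg (show ¬ ((decide (i < j) && shareB (fun i => d.getD (emails.getD i "") []) i j) = true) by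
      rw [Bool.and_eq_true]; rintro ⟨h1, -⟩; exact hij (of_decide_eq_true h1))]

def appIdx (m : Nat) (g : List Nat) : List Nat :=
  if g = [] ∨ g.getLast? ≠ some m then g ++ [m] else g

theorem byPw_inner (m : Nat) (base : String → List Nat) (hb : ∀ q v, v ∈ base q → v < m) :
    ∀ (l seen : List String) (bp : PySem.Dict String (List Nat)),
    (∀ q, bp.getD q [] = base q ++ (if q ∈ seen then [m] else [])) →
    ∀ q, (l.foldl (fun bp p => bp.modify p [] (appIdx m)) bp).getD q []
        = base q ++ (if q ∈ seen ∨ q ∈ l then [m] else []) := by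
  intro l
  induction l with
  | nil => intro seen bp h q; simpa using h q
  | cons p rest ih =>
    intro seen bp h q
    simp only [List.foldl_cons]
    have hstep : ∀ q2, (bp.modify p [] (appIdx m)).getD q2 []
        = base q2 ++ (if q2 ∈ seen ++ [p] then [m] else []) := by
      intro q2
      by_cases hq : q2 = p
      · subst hq
        rw [PySem.Dict.getD_modify_self, h q2]
        by_cases hq2 : q2 ∈ seen
        · simp [hq2, appIdx]
        · simp only [hq2, if_false, List.append_nil]
          unfold appIdx
          rcases hbp : (base q2).getLast? with _ | v
          · have : base q2 = [] := List.getLast?_eq_none_iff.1 hbp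
            simp [this]
          · have hv : v ∈ base q2 := List.mem_of_getLast? hbp
            have hne : v ≠ m := Nat.ne_of_lt (hb q2 v hv)
            simp [hne]
      · rw [PySem.Dict.getD_modify_of_ne]
        · rw [h q2]
          have hiff : (q2 ∈ seen ++ [p]) ↔ (q2 ∈ seen) := by
            simp [List.mem_append, hq]
          simp only [hiff]
        · exact hq
    have := ih (seen ++ [p]) _ hstep q
    rw [this]
    congr 1
    have hiff : (q ∈ seen ++ [p] ∨ q ∈ rest) ↔ (q ∈ seen ∨ q ∈ p :: rest) := by
      simp [List.mem_append, List.mem_cons, or_assoc]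
    simp only [hiff]

theorem byPw_char (d : PySem.Dict String (List String)) (emails : List String) :
    ∀ q, ((PySem.List.enumerate emails).foldl (fun bp e =>
      (d.getD e.2 []).foldl (fun bp p =>
        bp.modify p [] (fun g =>
          if g = [] ∨ g.getLast? ≠ some e.1.toNat then g ++ [e.1.toNat] else g)) bp)
      PySem.Dict.empty).getD q []
    = (List.range emails.length).filter (fun i => decide (q ∈ d.getD (emails.getD i "") [])) := by
  rw [enumerate_eq_range_map emails "", List.foldl_map]
  have hfn : ∀ (bp : PySem.Dict String (List Nat)), ∀ k ∈ List.range emails.length,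
      (d.getD (((k : Int), emails.getD k "")).2 []).foldl (fun bp p =>
        bp.modify p [] (fun g =>
          if g = [] ∨ g.getLast? ≠ some (((k : Int), emails.getD k "")).1.toNat then
            g ++ [(((k : Int), emails.getD k "")).1.toNat] else g)) bp
      = (d.getD (emails.getD k "") []).foldl (fun bp p => bp.modify p [] (appIdx k)) bp := by
    intro bp k _
    simp only [Int.toNat_natCast]
    rfl
  rw [PySem.List.foldl_congr_mem _ _ _ _ hfn]
  suffices h : ∀ m q, ((List.range m).foldl (fun bp k =>
      (d.getD (emails.getD k "") []).foldl (fun bp p => bp.modify p [] (appIdx k)) bp)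
      PySem.Dict.empty).getD q []
      = (List.range m).filter (fun i => decide (q ∈ d.getD (emails.getD i "") [])) by
    intro q; exact h emails.length q
  intro m
  induction m with
  | zero => intro q; simp [PySem.Dict.getD_empty]
  | succ m ih =>
    intro q
    rw [List.range_succ, List.foldl_append, List.filter_append]
    simp only [List.foldl_cons, List.foldl_nil, List.filter_cons, List.filter_nil]
    have hbase : ∀ q2 v, v ∈ (List.range m).filter (fun i => decide (q2 ∈ d.getD (emails.getD i "") [])) → v < m := by
      intro q2 v hv
      exact List.mem_range.1 (List.mem_of_mem_filter hv)
    have hpre : ∀ q2, ((List.range m).foldl (fun bp k =>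
        (d.getD (emails.getD k "") []).foldl (fun bp p => bp.modify p [] (appIdx k)) bp)
        PySem.Dict.empty).getD q2 []
        = (List.range m).filter (fun i => decide (q2 ∈ d.getD (emails.getD i "") [])) ++ (if q2 ∈ ([] : List String) then [m] else []) := by
      intro q2; simpa using ih q2
    rw [byPw_inner m _ hbase _ [] _ hpre q]
    by_cases hq : q ∈ d.getD (emails.getD m "") []
    · simp
    · simp

def byPwOf (d : PySem.Dict String (List String)) (emails : List String) : PySem.Dict String (List Nat) :=
  (PySem.List.enumerate emails).foldl (fun bp e =>
    (d.getD e.2 []).foldl (fun bp p =>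
      bp.modify p [] (fun g =>
        if g = [] ∨ g.getLast? ≠ some e.1.toNat then g ++ [e.1.toNat] else g)) bp)
    PySem.Dict.empty

theorem byPw_nodup (d : PySem.Dict String (List String)) (emails : List String) :
    (byPwOf d emails).keys.Nodup := by
  unfold byPwOf
  apply foldl_preserve (fun bp : PySem.Dict String (List Nat) => bp.keys.Nodup)
  · intro s e hs
    exact PySem.Dict.nodup_keys_foldl_modify_key _ (fun p => p) [] _ s hs
  · exact PySem.Dict.nodup_keys_empty

def pwFilter (d : PySem.Dict String (List String)) (emails : List String) (q : String) : List Nat :=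
  (List.range emails.length).filter (fun i => decide (q ∈ d.getD (emails.getD i "") []))

theorem byPwOf_getD (d : PySem.Dict String (List String)) (emails : List String) (q : String) :
    (byPwOf d emails).getD q [] = pwFilter d emails q := byPw_char d emails q

theorem values_byPw_sub (d : PySem.Dict String (List String)) (emails : List String) :
    ∀ g ∈ (byPwOf d emails).values, ∃ q, g = pwFilter d emails q := by
  intro g hg
  rw [PySem.Dict.values_eq_map_keys _ (byPw_nodup d emails) []] at hg
  obtain ⟨q, _, rfl⟩ := List.mem_map.1 hg
  exact ⟨q, byPwOf_getD d emails q⟩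

theorem filter_mem_values (d : PySem.Dict String (List String)) (emails : List String)
    (q : String) (hne : pwFilter d emails q ≠ []) :
    pwFilter d emails q ∈ (byPwOf d emails).values := by
  have hc : (byPwOf d emails).contains q = true := by
    by_contra h
    have h' : (byPwOf d emails).contains q = false := by
      cases hcc : (byPwOf d emails).contains q
      · rfl
      · exact absurd hcc h
    have := PySem.Dict.getD_of_not_contains (d := byPwOf d emails) (k := q) (d0 := ([] : List Nat)) h'
    rw [byPwOf_getD] at this
    exact hne this
  rw [PySem.Dict.values_eq_map_keys _ (byPw_nodup d emails) []]
  exact List.mem_map.2 ⟨q, (PySem.Dict.contains_iff_mem_keys _ _).1 hc, byPwOf_getD d emails q⟩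

def neighStep (ne : List (PySem.Set Nat)) (g : List Nat) : List (PySem.Set Nat) :=
  (List.range g.length).foldl (fun ne a =>
    (List.range' (a+1) (g.length - (a+1))).foldl (fun ne b =>
      ne.set (g.getD a 0) (PySem.Set.add (ne.getD (g.getD a 0) []) (g.getD b 0))) ne) ne

theorem foldl_set_add (g : List Nat) (ia : Nat) :
    ∀ (bs : List Nat) (ne : List (PySem.Set Nat)), ia < ne.length →
    bs.foldl (fun ne b => ne.set ia (PySem.Set.add (ne.getD ia []) (g.getD b 0))) ne
      = ne.set ia (bs.foldl (fun s b => PySem.Set.add s (g.getD b 0)) (ne.getD ia [])) := by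
  intro bs
  induction bs with
  | nil =>
    intro ne h
    simp only [List.foldl_nil, List.getD]
    rw [List.getElem?_eq_getElem h]
    simp
  | cons b bs ih =>
    intro ne h
    simp only [List.foldl_cons]
    rw [ih _ (by simpa using h)]
    rw [List.set_set]
    congr 1
    rw [List.getD_eq_getElem _ _ (by simpa using h), List.getElem_set_self, List.getD_eq_getElem _ _ h]

theorem nodup_foldl_add {β : Type} (f : β → Nat) (l : List β) (s : PySem.Set Nat) (h : s.Nodup) :
    (l.foldl (fun s b => PySem.Set.add s (f b)) s).Nodup :=
  foldl_preserve _ _ (fun s x hx => PySem.Set.nodup_add s (f x) hx) l s h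

theorem neighStep_fold (n : Nat) (g : List Nat) (hgn : ∀ v ∈ g, v < n) :
    ∀ (as : List Nat), (∀ a ∈ as, a < g.length) →
    ∀ (ne : List (PySem.Set Nat)), ne.length = n →
    ∀ (M : Nat → Nat → Prop), (∀ i, (ne.getD i []).Nodup ∧ ∀ j, (j ∈ ne.getD i [] ↔ M i j)) →
    ((as.foldl (fun ne a => (List.range' (a+1) (g.length - (a+1))).foldl (fun ne b =>
        ne.set (g.getD a 0) (PySem.Set.add (ne.getD (g.getD a 0) []) (g.getD b 0))) ne) ne).length = n ∧
     ∀ i, ((as.foldl (fun ne a => (List.range' (a+1) (g.length - (a+1))).foldl (fun ne b =>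
        ne.set (g.getD a 0) (PySem.Set.add (ne.getD (g.getD a 0) []) (g.getD b 0))) ne) ne).getD i []).Nodup ∧
      ∀ j, (j ∈ (as.foldl (fun ne a => (List.range' (a+1) (g.length - (a+1))).foldl (fun ne b =>
        ne.set (g.getD a 0) (PySem.Set.add (ne.getD (g.getD a 0) []) (g.getD b 0))) ne) ne).getD i []
        ↔ M i j ∨ ∃ a ∈ as, g.getD a 0 = i ∧ ∃ b, a < b ∧ b < g.length ∧ g.getD b 0 = j)) := by
  intro as
  induction as with
  | nil =>
    intro _ ne hlen M hM
    refine ⟨hlen, fun i => ⟨(hM i).1, fun j => ?_⟩⟩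
    simp only [List.foldl_nil]
    rw [(hM i).2 j]
    simp
  | cons a as ih =>
    intro has ne hlen M hM
    simp only [List.foldl_cons]
    have ha : a < g.length := has a (List.mem_cons_self)
    have hia : g.getD a 0 ∈ g := by
      rw [List.getD_eq_getElem _ _ ha]; exact List.getElem_mem ha
    have hialt : g.getD a 0 < ne.length := hlen ▸ hgn _ hia
    rw [foldl_set_add g (g.getD a 0) _ ne hialt]
    set newset := (List.range' (a+1) (g.length - (a+1))).foldl
        (fun s b => PySem.Set.add s (g.getD b 0)) (ne.getD (g.getD a 0) []) with hnewset
    have hlen1 : (ne.set (g.getD a 0) newset).length = n := by simpa using hlen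
    have hM1 : ∀ i, ((ne.set (g.getD a 0) newset).getD i []).Nodup ∧
        ∀ j, (j ∈ (ne.set (g.getD a 0) newset).getD i []
          ↔ (M i j ∨ (g.getD a 0 = i ∧ ∃ b, a < b ∧ b < g.length ∧ g.getD b 0 = j))) := by
      intro i
      by_cases hi : i = g.getD a 0
      · subst hi
        rw [List.getD_eq_getElem _ _ (by simpa using hialt), List.getElem_set_self]
        constructor
        · exact nodup_foldl_add _ _ _ (hM _).1
        · intro j
          rw [PySem.Set.mem_foldl_add]
          rw [(hM _).2 j]
          constructor
          · rintro (hm | ⟨b, hb, rfl⟩)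
            · exact Or.inl hm
            · rw [List.mem_range'_1] at hb
              exact Or.inr ⟨rfl, b, hb.1, by omega, rfl⟩
          · rintro (hm | ⟨-, b, hab, hbl, rfl⟩)
            · exact Or.inl hm
            · refine Or.inr ⟨b, ?_, rfl⟩
              rw [List.mem_range'_1]
              omega
      · have hglt : (ne.set (g.getD a 0) newset).getD i [] = ne.getD i [] := by
          rcases Nat.lt_or_ge i ne.length with hlt | hge
          · rw [List.getD_eq_getElem _ _ (by simpa using hlt), List.getD_eq_getElem _ _ hlt,
              List.getElem_set_ne (by omega)]
          · rw [List.getD_eq_default _ _ (by simpa using hge), List.getD_eq_default _ _ hge]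
        rw [hglt]
        refine ⟨(hM i).1, fun j => ?_⟩
        rw [(hM i).2 j]
        constructor
        · exact Or.inl
        · rintro (hm | ⟨hia2, -⟩)
          · exact hm
          · exact absurd hia2.symm hi
    have := ih (fun a' ha' => has a' (List.mem_cons_of_mem _ ha')) _ hlen1 _ hM1
    refine ⟨this.1, fun i => ⟨(this.2 i).1, fun j => ?_⟩⟩
    rw [(this.2 i).2 j]
    constructor
    · rintro ((hm | hc) | ⟨b, hb, hrest⟩)
      · exact Or.inl hm
      · exact Or.inr ⟨a, List.mem_cons_self, hc⟩
      · exact Or.inr ⟨b, List.mem_cons_of_mem _ hb, hrest⟩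
    · rintro (hm | ⟨a', ha', hrest⟩)
      · exact Or.inl (Or.inl hm)
      · rcases List.mem_cons.1 ha' with rfl | ha''
        · exact Or.inl (Or.inr hrest)
        · exact Or.inr ⟨a', ha'', hrest⟩

theorem neighStep_char (n : Nat) (g : List Nat) (hg : List.Pairwise (· < ·) g) (hgn : ∀ v ∈ g, v < n)
    (ne : List (PySem.Set Nat)) (hlen : ne.length = n)
    (M : Nat → Nat → Prop) (hM : ∀ i, (ne.getD i []).Nodup ∧ ∀ j, (j ∈ ne.getD i [] ↔ M i j)) :
    (neighStep ne g).length = n ∧ ∀ i, ((neighStep ne g).getD i []).Nodup ∧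
      ∀ j, (j ∈ (neighStep ne g).getD i [] ↔ M i j ∨ (i ∈ g ∧ j ∈ g ∧ i < j)) := by
  unfold neighStep
  have h := neighStep_fold n g hgn (List.range g.length) (fun a ha => List.mem_range.1 ha) ne hlen M hM
  refine ⟨h.1, fun i => ⟨(h.2 i).1, fun j => ?_⟩⟩
  rw [(h.2 i).2 j]
  apply or_congr_right
  constructor
  · rintro ⟨a, ha, rfl, b, hab, hb, rfl⟩
    have ha' : a < g.length := List.mem_range.1 ha
    rw [List.getD_eq_getElem _ _ ha', List.getD_eq_getElem _ _ hb]
    exact ⟨List.getElem_mem _, List.getElem_mem _, (List.pairwise_iff_getElem.1 hg) a b ha' hb hab⟩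
  · rintro ⟨hi, hj, hij⟩
    obtain ⟨a, ha, rfl⟩ := List.getElem_of_mem hi
    obtain ⟨b, hb, rfl⟩ := List.getElem_of_mem hj
    have hab : a < b := by
      rcases Nat.lt_trichotomy a b with h1 | rfl | h1
      · exact h1
      · omega
      · exact absurd ((List.pairwise_iff_getElem.1 hg) b a hb ha h1) (by omega)
    exact ⟨a, List.mem_range.2 ha, List.getD_eq_getElem _ _ ha, b, hab, hb, List.getD_eq_getElem _ _ hb⟩

theorem neigh_all (n : Nat) :
    ∀ (G : List (List Nat)), (∀ g ∈ G, List.Pairwise (· < ·) g ∧ ∀ v ∈ g, v < n) →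
    ∀ (ne : List (PySem.Set Nat)), ne.length = n →
    ∀ (M : Nat → Nat → Prop), (∀ i, (ne.getD i []).Nodup ∧ ∀ j, (j ∈ ne.getD i [] ↔ M i j)) →
    ((G.foldl neighStep ne).length = n ∧ ∀ i, ((G.foldl neighStep ne).getD i []).Nodup ∧
      ∀ j, (j ∈ (G.foldl neighStep ne).getD i [] ↔ M i j ∨ ∃ g ∈ G, i ∈ g ∧ j ∈ g ∧ i < j)) := by
  intro G
  induction G with
  | nil =>
    intro _ ne hlen M hM
    refine ⟨hlen, fun i => ⟨(hM i).1, fun j => ?_⟩⟩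
    simp only [List.foldl_nil]
    rw [(hM i).2 j]
    simp
  | cons g G ih =>
    intro hG ne hlen M hM
    simp only [List.foldl_cons]
    have hg := hG g List.mem_cons_self
    have h1 := neighStep_char n g hg.1 hg.2 ne hlen M hM
    have h2 := ih (fun g' hg' => hG g' (List.mem_cons_of_mem _ hg')) _ h1.1 _ h1.2
    refine ⟨h2.1, fun i => ⟨(h2.2 i).1, fun j => ?_⟩⟩
    rw [(h2.2 i).2 j]
    constructor
    · rintro ((hm | hgrel) | ⟨g', hg', hrel⟩)
      · exact Or.inl hm
      · exact Or.inr ⟨g, List.mem_cons_self, hgrel⟩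
      · exact Or.inr ⟨g', List.mem_cons_of_mem _ hg', hrel⟩
    · rintro (hm | ⟨g', hg', hrel⟩)
      · exact Or.inl (Or.inl hm)
      · rcases List.mem_cons.1 hg' with rfl | h'
        · exact Or.inl (Or.inr hrel)
        · exact Or.inr ⟨g', h', hrel⟩

theorem getD_const_nil (n i : Nat) :
    ((List.range n).map (fun _ => ([] : PySem.Set Nat))).getD i [] = [] := by
  rcases Nat.lt_or_ge i n with h | h
  · rw [List.getD_eq_getElem _ _ (by simpa using h)]
    simp
  · rw [List.getD_eq_default _ _ (by simpa using h)]

def neighOf (d : PySem.Dict String (List String)) (emails : List String) : List (PySem.Set Nat) :=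
  (byPwOf d emails).values.foldl neighStep ((List.range emails.length).map (fun _ => []))

theorem neighOf_char (d : PySem.Dict String (List String)) (emails : List String) :
    (neighOf d emails).length = emails.length ∧ ∀ i, ((neighOf d emails).getD i []).Nodup ∧
      ∀ j, (j ∈ (neighOf d emails).getD i []
        ↔ ∃ g ∈ (byPwOf d emails).values, i ∈ g ∧ j ∈ g ∧ i < j) := by
  have hG : ∀ g ∈ (byPwOf d emails).values, List.Pairwise (· < ·) g ∧ ∀ v ∈ g, v < emails.length := by
    intro g hg
    obtain ⟨q, rfl⟩ := values_byPw_sub d emails g hg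
    constructor
    · exact List.Pairwise.filter _ List.pairwise_lt_range
    · intro v hv
      exact List.mem_range.1 (List.mem_of_mem_filter hv)
  have h := neigh_all emails.length (byPwOf d emails).values hG
      ((List.range emails.length).map (fun _ => [])) (by simp)
      (fun _ _ => False)
      (fun i => by rw [getD_const_nil]; exact ⟨List.nodup_nil, fun j => by simp⟩)
  refine ⟨h.1, fun i => ⟨(h.2 i).1, fun j => ?_⟩⟩
  unfold neighOf
  rw [(h.2 i).2 j]
  simp

theorem inner_eq (d : PySem.Dict String (List String)) (emails : List String) (i : Nat)
    (hi : i < emails.length) :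
    PySem.List.sorted ((neighOf d emails).getD i []) (fun x => x)
    = (List.range emails.length).filter
        (fun j => decide (i < j) && shareB (fun k => d.getD (emails.getD k "") []) i j) := by
  apply PySem.List.sorted_eq_of_perm_of_pairwise_lt
  · rw [List.perm_ext_iff_of_nodup
      (List.Nodup.filter _ (List.nodup_range)) ((neighOf_char d emails).2 i).1]
    intro j
    rw [List.mem_filter, ((neighOf_char d emails).2 i).2 j]
    constructor
    · rintro ⟨hjr, hcond⟩
      rw [Bool.and_eq_true] at hcond
      obtain ⟨q, hq1, hq2⟩ := List.any_eq_true.1 hcond.2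
      have hq2' : q ∈ d.getD (emails.getD j "") [] := by simpa using hq2
      have hij : i < j := of_decide_eq_true hcond.1
      refine ⟨pwFilter d emails q, ?_, ?_, ?_, hij⟩
      · apply filter_mem_values
        intro hemp
        have : i ∈ pwFilter d emails q := by
          unfold pwFilter
          rw [List.mem_filter]
          exact ⟨List.mem_range.2 hi, decide_eq_true hq1⟩
        rw [hemp] at this
        exact absurd this (List.not_mem_nil)
      · unfold pwFilter
        rw [List.mem_filter]
        exact ⟨List.mem_range.2 hi, decide_eq_true hq1⟩
      · unfold pwFilter
        rw [List.mem_filter]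
        exact ⟨hjr, decide_eq_true hq2'⟩
    · rintro ⟨g, hg, hig, hjg, hij⟩
      obtain ⟨q, rfl⟩ := values_byPw_sub d emails g hg
      unfold pwFilter at hig hjg
      rw [List.mem_filter] at hig hjg
      refine ⟨hjg.1, ?_⟩
      rw [Bool.and_eq_true]
      refine ⟨decide_eq_true hij, ?_⟩
      apply List.any_eq_true.2
      refine ⟨q, of_decide_eq_true hig.2, ?_⟩
      simpa using of_decide_eq_true hjg.2
  · exact List.Pairwise.filter _ List.pairwise_lt_range

theorem B_nodes (d : PySem.Dict String (List String)) (emails : List String) :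
    (List.range emails.length).foldl (fun nodes i =>
      (PySem.List.sorted ((((PySem.List.enumerate emails).foldl (fun bp e =>
          (d.getD e.2 []).foldl (fun bp p =>
            bp.modify p [] (fun g =>
              if g = [] ∨ g.getLast? ≠ some e.1.toNat then g ++ [e.1.toNat] else g)) bp)
          PySem.Dict.empty).values.foldl (fun ne g =>
            (List.range g.length).foldl (fun ne a =>
              (List.range' (a+1) (g.length - (a+1))).foldl (fun ne b =>
                ne.set (g.getD a 0) (PySem.Set.add (ne.getD (g.getD a 0) []) (g.getD b 0))) ne) ne)
          ((List.range emails.length).map (fun _ => []))).getD i []) (fun x => x)).foldl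
        (fun nodes j =>
          if nodes.getD i 0 > nodes.getD j 0 then nodes.set i (nodes.getD j 0)
          else if nodes.getD i 0 < nodes.getD j 0 then nodes.set j (nodes.getD i 0)
          else nodes) nodes) (List.range emails.length)
    = canonNodes (fun i => d.getD (emails.getD i "") []) emails.length := by
  show (List.range emails.length).foldl (fun nodes i =>
      (PySem.List.sorted ((neighOf d emails).getD i []) (fun x => x)).foldl
        (fun nodes j =>
          if nodes.getD i 0 > nodes.getD j 0 then nodes.set i (nodes.getD j 0)
          else if nodes.getD i 0 < nodes.getD j 0 then nodes.set j (nodes.getD i 0)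
          else nodes) nodes) (List.range emails.length)
    = canonNodes (fun i => d.getD (emails.getD i "") []) emails.length
  unfold canonNodes
  apply PySem.List.foldl_congr_mem
  intro nodes i hi
  rw [inner_eq d emails i (List.mem_range.1 hi)]
  rfl

theorem getD_set_le (s : List Nat) (i v k : Nat) (hv : v ≤ i) (hs : ∀ k, s.getD k 0 ≤ k) :
    (s.set i v).getD k 0 ≤ k := by
  rcases Nat.lt_or_ge k s.length with h | h
  · rw [List.getD_eq_getElem _ _ (by simpa using h), List.getElem_set]
    split_ifs with hik
    · omega
    · rw [← List.getD_eq_getElem _ 0 h]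
      exact hs k
  · rw [List.getD_eq_default _ _ (by simpa using h)]
    exact Nat.zero_le k

theorem canon_inv (pwl : Nat → List String) (n : Nat) :
    ∀ k, (canonNodes pwl n).getD k 0 ≤ k := by
  unfold canonNodes
  apply foldl_preserve (fun nodes : List Nat => ∀ k, nodes.getD k 0 ≤ k)
  · intro s i hs
    apply foldl_preserve (fun nodes : List Nat => ∀ k, nodes.getD k 0 ≤ k)
    · intro s2 j hs2 k
      unfold mergeStep
      split_ifs with h1 h2
      · exact getD_set_le s2 i (s2.getD j 0) k (le_of_lt (lt_of_lt_of_le h1 (hs2 i))) hs2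
      · exact getD_set_le s2 j (s2.getD i 0) k (le_of_lt (lt_of_lt_of_le h2 (hs2 j))) hs2
      · exact hs2 k
    · exact hs
  · intro k
    rcases Nat.lt_or_ge k n with h | h
    · rw [List.getD_eq_getElem _ _ (by simpa using h)]
      simp
    · rw [List.getD_eq_default _ _ (by simpa using h)]
      exact Nat.zero_le k

theorem roots_memo (nodes : List Nat) (hinv : ∀ k, nodes.getD k 0 ≤ k) (m : Nat) :
    (List.range m).foldl (fun rs i =>
        rs ++ [if nodes.getD i 0 = i then i else rs.getD (nodes.getD i 0) 0]) []
    = (List.range m).map (fun index => pyRoot nodes index) := by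
  induction m with
  | zero => simp
  | succ m ih =>
    rw [List.range_succ, List.foldl_append, List.map_append, ih]
    simp only [List.foldl_cons, List.foldl_nil, List.map_cons, List.map_nil]
    congr 1
    by_cases h : nodes.getD m 0 = m
    · rw [if_pos h, pyRoot, if_pos h]
    · have hlt : nodes.getD m 0 < m := Nat.lt_of_le_of_ne (hinv m) h
      rw [if_neg h]
      rw [List.getD_eq_getElem _ _ (by simpa using hlt)]
      rw [List.getElem_map, List.getElem_range]
      conv_rhs => rw [pyRoot]
      rw [if_neg h, dif_pos hlt]

theorem final_eq (pw : List (String × List String)) : union_find_set pw = union_find_set_alt pw := by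
  simp only [union_find_set, union_find_set_alt]
  rw [A_nodes (PySem.Dict.ofList pw) (PySem.Dict.ofList pw).keys]
  rw [B_nodes (PySem.Dict.ofList pw) (PySem.Dict.ofList pw).keys]
  rw [roots_memo _ (canon_inv _ _)]


-- ===== VERDICT (by name: the statement is the Claim_ definition above) =====
theorem union_find_set_spec : Claim_equal_union_find_set := by
  intro pw _
  exact final_eq pw
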